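-- pv_equiv track=rewrite | github.com/Secrettestbot/Super-board-game-game | games/patchwork.py | _rotate_shape
-- ===== SOURCE A (Python) =====
-- def _rotate_shape(shape, times=1):
--     """Rotate a shape 90 degrees clockwise, the given number of times."""
--     s = list(shape)
--     for _ in range(times % 4):
--         s = [(c, -r) for r, c in s]
--         # Normalize to non-negative coordinates
--         min_r = min(r for r, c in s)
--         min_c = min(c for r, c in s)
--         s = [(r - min_r, c - min_c) for r, c in s]
--     return s
-- ===== SOURCE B (Python) =====
-- def _rotate_shape(shape, times=1):
--     """Rotate a shape 90 degrees clockwise, the given number of times."""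
--     r = times % 4
--     if r == 0:
--         return list(shape)
--     if r == 1:
--         s = [(c, -rr) for rr, c in shape]
--     elif r == 2:
--         s = [(-rr, -c) for rr, c in shape]
--     else:
--         s = [(-c, rr) for rr, c in shape]
--     min_r = min(p[0] for p in s)
--     min_c = min(p[1] for p in s)
--     return [(p[0] - min_r, p[1] - min_c) for p in s]
-- ===== Notes on version B (the rewrite author's own statement) =====
-- stated objective: simpler
-- what changed: B replaces A's loop of (times % 4) rotate-then-normalize passes with a single closed-form transform chosen by times % 4 ((c,-r), (-r,-c) or (-c,r)) followed by exactly one normalization; Pre_ excludes the empty shape with times % 4 != 0, on which both A and B raise ValueError via min() of an empty sequence.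
import Mathlib
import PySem

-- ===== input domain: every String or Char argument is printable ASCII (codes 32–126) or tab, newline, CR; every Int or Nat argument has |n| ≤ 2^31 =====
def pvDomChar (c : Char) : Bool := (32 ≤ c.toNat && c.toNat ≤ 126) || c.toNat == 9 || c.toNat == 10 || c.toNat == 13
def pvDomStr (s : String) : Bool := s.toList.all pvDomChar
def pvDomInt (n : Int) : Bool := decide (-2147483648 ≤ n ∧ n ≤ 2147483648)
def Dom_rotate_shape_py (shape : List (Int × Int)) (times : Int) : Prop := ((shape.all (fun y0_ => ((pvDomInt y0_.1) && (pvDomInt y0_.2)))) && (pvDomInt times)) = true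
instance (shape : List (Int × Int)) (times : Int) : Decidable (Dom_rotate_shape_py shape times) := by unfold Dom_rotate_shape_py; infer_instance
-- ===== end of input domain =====

-- B replaces A's rotate-and-normalize loop by one closed-form transform selected by times % 4
-- plus a single final normalization (objective: simpler).

-- Python's builtin min over a nonempty int sequence (the 0 default is unreached under Pre_).
def pvMinInt (xs : List Int) : Int :=
  match xs with
  | [] => 0
  | x :: rest => rest.foldl min x

-- ===== PORT A =====
-- one iteration of A's loop body: rotate 90° clockwise, then normalize
def pvStepA (s : List (Int × Int)) : List (Int × Int) :=
  let s1 := s.map (fun p => (p.2, -p.1))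
  let min_r := pvMinInt (s1.map Prod.fst)
  let min_c := pvMinInt (s1.map Prod.snd)
  s1.map (fun p => (p.1 - min_r, p.2 - min_c))

def rotate_shape_py (shape : List (Int × Int)) (times : Int) : List (Int × Int) :=
  (List.range (PySem.Int.mod times 4).toNat).foldl (fun s _ => pvStepA s) shape

-- ===== PORT B =====
def rotate_shape_py_alt (shape : List (Int × Int)) (times : Int) : List (Int × Int) :=
  let r := PySem.Int.mod times 4
  if r = 0 then shape
  else
    let s :=
      if r = 1 then shape.map (fun p => (p.2, -p.1))
      else if r = 2 then shape.map (fun p => (-p.1, -p.2))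
      else shape.map (fun p => (-p.2, p.1))
    let min_r := pvMinInt (s.map Prod.fst)
    let min_c := pvMinInt (s.map Prod.snd)
    s.map (fun p => (p.1 - min_r, p.2 - min_c))

-- ===== PRECONDITION & SPEC =====
-- Pre_ excludes exactly the inputs where A raises ValueError: an empty shape with times % 4 ≠ 0
-- (min() of an empty sequence); B raises the same ValueError there.
def Pre_rotate_shape_py (shape : List (Int × Int)) (times : Int) : Prop :=
  shape ≠ [] ∨ PySem.Int.mod times 4 = 0
instance (shape : List (Int × Int)) (times : Int) : Decidable (Pre_rotate_shape_py shape times) := by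
  unfold Pre_rotate_shape_py; infer_instance

def pvWitness_rotate_shape_py : (List (Int × Int)) × Int := ([(0, 0), (0, 1), (1, 1)], 3)

def Spec_rotate_shape_py (shape : List (Int × Int)) (times : Int) (out : List (Int × Int)) : Prop := out = rotate_shape_py_alt shape times
instance (shape : List (Int × Int)) (times : Int) (out : List (Int × Int)) : Decidable (Spec_rotate_shape_py shape times out) := by unfold Spec_rotate_shape_py; infer_instance

-- ===== CLAIM (what is proved, stated in full; the proofs are below) =====
def Claim_equal_rotate_shape_py : Prop := ∀ (shape : List (Int × Int)) (times : Int), Dom_rotate_shape_py shape times → Pre_rotate_shape_py shape times → Spec_rotate_shape_py shape times (rotate_shape_py shape times)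

-- ===== LEMMAS AND PROOFS =====

-- proof-only helpers: rotation, translation, normalization as named maps
def pvRot (s : List (Int × Int)) : List (Int × Int) := s.map (fun p => (p.2, -p.1))
def pvTrans (a b : Int) (s : List (Int × Int)) : List (Int × Int) :=
  s.map (fun p => (p.1 + a, p.2 + b))
def pvNorm (s : List (Int × Int)) : List (Int × Int) :=
  s.map (fun p => (p.1 - pvMinInt (s.map Prod.fst), p.2 - pvMinInt (s.map Prod.snd)))

lemma pvStepA_def (s : List (Int × Int)) : pvStepA s = pvNorm (pvRot s) := rfl

lemma foldl_min_add (xs : List Int) (a d : Int) :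
    List.foldl min (a + d) (xs.map (fun x => x + d)) = List.foldl min a xs + d := by
  induction xs generalizing a with
  | nil => simp
  | cons y ys ih =>
    simp only [List.map_cons, List.foldl_cons]
    rw [min_add_add_right]
    exact ih (min a y)

lemma pvMinInt_add (xs : List Int) (d : Int) (h : xs ≠ []) :
    pvMinInt (xs.map (fun x => x + d)) = pvMinInt xs + d := by
  cases xs with
  | nil => exact absurd rfl h
  | cons x rest => simpa [pvMinInt] using foldl_min_add rest x d

lemma pvNorm_trans (a b : Int) (s : List (Int × Int)) (h : s ≠ []) :
    pvNorm (pvTrans a b s) = pvNorm s := by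
  have hmapne : ∀ (g : Int × Int → Int), s.map g ≠ [] := by
    intro g hc; exact h (List.map_eq_nil_iff.mp hc)
  have hfst : (pvTrans a b s).map Prod.fst = (s.map Prod.fst).map (fun x => x + a) := by
    simp [pvTrans, List.map_map, Function.comp]
  have hsnd : (pvTrans a b s).map Prod.snd = (s.map Prod.snd).map (fun x => x + b) := by
    simp [pvTrans, List.map_map, Function.comp]
  simp only [pvNorm]
  rw [hfst, hsnd, pvMinInt_add _ a (hmapne Prod.fst), pvMinInt_add _ b (hmapne Prod.snd)]
  simp only [pvTrans, List.map_map]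
  apply List.map_congr_left; intro p _
  simp only [Function.comp, Prod.mk.injEq]; constructor <;> ring

lemma pvRot_trans (a b : Int) (s : List (Int × Int)) :
    pvRot (pvTrans a b s) = pvTrans b (-a) (pvRot s) := by
  simp only [pvRot, pvTrans, List.map_map]
  apply List.map_congr_left; intro p _
  simp only [Function.comp, Prod.mk.injEq]; exact ⟨trivial, by ring⟩

lemma pvStepA_trans (a b : Int) (s : List (Int × Int)) (h : s ≠ []) :
    pvStepA (pvTrans a b s) = pvStepA s := by
  have hrne : pvRot s ≠ [] := by
    intro hc; exact h (List.map_eq_nil_iff.mp hc)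
  rw [pvStepA_def, pvRot_trans, pvNorm_trans _ _ _ hrne, pvStepA_def]

lemma pvNorm_eq_trans (s : List (Int × Int)) :
    pvNorm s = pvTrans (-(pvMinInt (s.map Prod.fst))) (-(pvMinInt (s.map Prod.snd))) s := by
  simp [pvNorm, pvTrans, sub_eq_add_neg]

lemma pvStepA_norm (s : List (Int × Int)) (h : s ≠ []) :
    pvStepA (pvNorm s) = pvStepA s := by
  rw [pvNorm_eq_trans, pvStepA_trans _ _ _ h]

lemma pvRot_rot (s : List (Int × Int)) :
    pvRot (pvRot s) = s.map (fun p => (-p.1, -p.2)) := by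
  simp [pvRot, List.map_map, Function.comp]

lemma pvRot_map_neg (s : List (Int × Int)) :
    pvRot (s.map (fun p : Int × Int => (-p.1, -p.2))) = s.map (fun p => (-p.2, p.1)) := by
  simp [pvRot, List.map_map, Function.comp]

lemma pvMap_ne {f : Int × Int → Int × Int} {s : List (Int × Int)} (h : s ≠ []) :
    s.map f ≠ [] := by
  intro hc; exact h (List.map_eq_nil_iff.mp hc)

-- ===== VERDICT (by name: the statement is the Claim_ definition above) =====
theorem rotate_shape_py_spec : Claim_equal_rotate_shape_py := by
  intro shape times _ hpre
  unfold Spec_rotate_shape_py rotate_shape_py rotate_shape_py_alt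
  have h4 : (0 : Int) < 4 := by norm_num
  have hlo := PySem.Int.mod_nonneg times h4
  have hhi := PySem.Int.mod_lt times h4
  set r := PySem.Int.mod times 4 with hr
  have hcases : r = 0 ∨ r = 1 ∨ r = 2 ∨ r = 3 := by omega
  have hne : r ≠ 0 → shape ≠ [] := by
    intro h0
    rcases hpre with hne | hz
    · exact hne
    · exact absurd (hr ▸ hz) h0
  rcases hcases with h | h | h | h
  · rw [h]; rfl
  · rw [h]; rfl
  · rw [h]
    show pvStepA (pvStepA shape) = pvNorm (shape.map (fun p => (-p.1, -p.2)))
    rw [pvStepA_def shape, pvStepA_norm (pvRot shape) (pvMap_ne (hne (by omega))),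
        pvStepA_def (pvRot shape), pvRot_rot]
  · rw [h]
    show pvStepA (pvStepA (pvStepA shape)) = pvNorm (shape.map (fun p => (-p.2, p.1)))
    rw [pvStepA_def shape, pvStepA_norm (pvRot shape) (pvMap_ne (hne (by omega))),
        pvStepA_def (pvRot shape), pvRot_rot,
        pvStepA_norm (shape.map (fun p => (-p.1, -p.2))) (pvMap_ne (hne (by omega))),
        pvStepA_def (shape.map (fun p => (-p.1, -p.2))), pvRot_map_neg]
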